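-- pv_equiv track=rewrite | github.com/raikoug/adventofcode | 2023/Solutions/Python/day_14_part_1.py | til_To_north_line
-- ===== SOURCE A (Python) =====
-- def til_To_north_line(line: list) -> list:
--     """
--        given a line like this: .#O.#O....
--          make the O roll to right untill it hits a #, a O or EOL
--          then return the line
--     """
--     # split line by "#"
--     sub_lines = line.split("#")
--     new_parts = list()
--     # for each sub_line i create the line again putting the O at the end, filling with "." if needed
--     for part in sub_lines:
--         if part == '':
--             new_parts.append(part)
--             continue
--
--         Os = part.count("O")
--         part = f"{'O'*Os:.>{len(part)}}"
--         new_parts.append(part)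
--         # replace the part in the original line
--
--     new_line = "#".join(new_parts)
--     return new_line
-- ===== SOURCE B (Python) =====
-- def til_To_north_line(line):
--     # One streaming pass with two counters instead of split/format/join:
--     # count dots and O's of the current segment, flush at each '#' and at the end.
--     out = []
--     os = 0
--     dots = 0
--     for c in line:
--         if c == '#':
--             out.append('.' * dots + 'O' * os + '#')
--             os = 0
--             dots = 0
--         elif c == 'O':
--             os += 1
--         else:
--             dots += 1
--     out.append('.' * dots + 'O' * os)
--     return ''.join(out)
-- ===== Notes on version B (the rewrite author's own statement) =====
-- stated objective: simpler
-- what changed: Replaces split-on-separator / per-part count-and-right-justify-format / rejoin with a single streaming pass that keeps two counters (dots and rocks) per segment and flushes a segment at each separator and at end of line.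
import Mathlib
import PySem

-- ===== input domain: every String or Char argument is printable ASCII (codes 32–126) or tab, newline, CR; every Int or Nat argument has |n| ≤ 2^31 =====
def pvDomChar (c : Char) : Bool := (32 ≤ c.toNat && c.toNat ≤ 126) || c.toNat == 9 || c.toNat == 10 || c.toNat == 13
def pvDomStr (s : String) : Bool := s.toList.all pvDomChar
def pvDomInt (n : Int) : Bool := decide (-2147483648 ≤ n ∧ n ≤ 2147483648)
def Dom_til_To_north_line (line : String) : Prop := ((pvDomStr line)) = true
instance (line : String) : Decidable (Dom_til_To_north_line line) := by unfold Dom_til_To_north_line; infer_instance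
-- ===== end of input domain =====

set_option maxRecDepth 4096


-- B replaces A's split/format/join with one streaming pass keeping two counters per segment (simpler decomposition, same cost).

-- ===== PORT A =====
-- A: split on "#", for each part count the O's and right-justify them in '.' fill, rejoin.
-- f"{'O'*Os:.>{len(part)}}" has no PySem primitive; since Os ≤ len(part) it is exactly
-- '.'*(len(part)-Os) ++ 'O'*Os, which is what the port writes (exact here).
def til_To_north_line (line : String) : String :=
  let subLines := PySem.Chars.splitOn line.toList ['#']
  let newParts := subLines.map (fun part =>
    if part = [] then part
    else
      let os := PySem.Chars.count part ['O']
      List.replicate (part.length - os) '.' ++ List.replicate os 'O')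
  String.mk (PySem.Chars.join ['#'] newParts)

-- ===== PORT B =====
-- B's loop: two counters (os, dots) for the current segment; flush at '#' and at end.
-- The recursion concatenates the flushed pieces, which is Source B's final ''.join(out).
def tilAltGo : List Char → Nat → Nat → List Char
  | [], os, dots => List.replicate dots '.' ++ List.replicate os 'O'
  | c :: rest, os, dots =>
    if c = '#' then
      (List.replicate dots '.' ++ List.replicate os 'O' ++ ['#']) ++ tilAltGo rest 0 0
    else if c = 'O' then tilAltGo rest (os + 1) dots
    else tilAltGo rest os (dots + 1)

def til_To_north_line_alt (line : String) : String :=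
  String.mk (tilAltGo line.toList 0 0)

-- ===== PRECONDITION & SPEC =====
def Spec_til_To_north_line (line : String) (out : String) : Prop := out = til_To_north_line_alt line
instance (line : String) (out : String) : Decidable (Spec_til_To_north_line line out) := by unfold Spec_til_To_north_line; infer_instance

-- ===== CLAIM (what is proved, stated in full; the proofs are below) =====
def Claim_equal_til_To_north_line : Prop := ∀ (line : String), Dom_til_To_north_line line → Spec_til_To_north_line line (til_To_north_line line)

-- ===== LEMMAS AND PROOFS =====

-- the (unconditional) per-part renormalisation; coincides with A's map function (the if-branch) on []
def tilSeg (p : List Char) : List Char :=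
  List.replicate (p.length - p.count 'O') '.' ++ List.replicate (p.count 'O') 'O'

lemma isPrefixOf_singleton (c d : Char) (rest : List Char) :
    [c].isPrefixOf (d :: rest) = (c == d) := by
  show (c == d && List.isPrefixOf [] rest) = (c == d)
  simp

lemma modifyHead_id' (l : List (List Char)) :
    List.modifyHead (fun x => x) l = l := by
  cases l <;> rfl

lemma intercalate_hash_cons₂ (a b : List Char) (l : List (List Char)) :
    ['#'].intercalate (a :: b :: l) = a ++ '#' :: (['#'].intercalate (b :: l)) := by
  simp [List.intercalate, List.intersperse]

lemma count_go_nil (c : Char) (fuel acc : Nat) :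
    PySem.Chars.count.go [c] fuel [] acc = acc := by
  cases fuel <;> rfl

lemma count_go_singleton (c : Char) : ∀ (fuel : Nat) (l : List Char) (acc : Nat),
    l.length ≤ fuel → PySem.Chars.count.go [c] fuel l acc = acc + l.count c := by
  intro fuel
  induction fuel with
  | zero =>
    intro l acc h
    have : l = [] := List.eq_nil_of_length_eq_zero (Nat.le_zero.mp h)
    subst this; simp [count_go_nil]
  | succ n ih =>
    intro l acc h
    cases l with
    | nil => simp [count_go_nil]
    | cons d rest =>
      have step : PySem.Chars.count.go [c] (n+1) (d :: rest) acc =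
          if [c].isPrefixOf (d :: rest) then PySem.Chars.count.go [c] n rest (acc + 1)
          else PySem.Chars.count.go [c] n rest acc := rfl
      have hlen : rest.length ≤ n := by simpa using Nat.le_of_succ_le_succ h
      rw [step, isPrefixOf_singleton]
      by_cases hd : c = d
      · subst hd
        rw [if_pos (by simp), ih rest (acc + 1) hlen, List.count_cons_self]
        omega
      · rw [if_neg (by simpa using hd), ih rest acc hlen,
          List.count_cons_of_ne (fun he => hd he.symm)]

lemma chars_count_singleton (c : Char) (l : List Char) :
    PySem.Chars.count l [c] = l.count c := by
  have h0 : PySem.Chars.count l [c] = PySem.Chars.count.go [c] l.length l 0 := by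
    simp [PySem.Chars.count, List.isEmpty]
  rw [h0, count_go_singleton c l.length l 0 le_rfl]
  omega

lemma splitOn_go_nil (c : Char) (fuel : Nat) (cur : List Char) (acc : List (List Char)) :
    PySem.Chars.splitOn.go [c] fuel [] cur acc = (cur.reverse :: acc).reverse := by
  cases fuel <;> simp [PySem.Chars.splitOn.go]

lemma splitOn_go_singleton (c : Char) : ∀ (fuel : Nat) (l cur : List Char) (acc : List (List Char)),
    l.length ≤ fuel →
    PySem.Chars.splitOn.go [c] fuel l cur acc =
      acc.reverse ++ List.modifyHead (cur.reverse ++ ·) (List.splitOnP (· == c) l) := by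
  intro fuel
  induction fuel with
  | zero =>
    intro l cur acc h
    have : l = [] := List.eq_nil_of_length_eq_zero (Nat.le_zero.mp h)
    subst this; simp [splitOn_go_nil, List.splitOnP_nil]
  | succ n ih =>
    intro l cur acc h
    cases l with
    | nil => simp [splitOn_go_nil, List.splitOnP_nil]
    | cons d rest =>
      have step : PySem.Chars.splitOn.go [c] (n+1) (d :: rest) cur acc =
          if [c].isPrefixOf (d :: rest) then
            PySem.Chars.splitOn.go [c] n (List.drop 1 (d :: rest)) [] (cur.reverse :: acc)
          else PySem.Chars.splitOn.go [c] n rest (d :: cur) acc := rfl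
      have hlen : rest.length ≤ n := by simpa using Nat.le_of_succ_le_succ h
      rw [step, isPrefixOf_singleton]
      by_cases hd : c = d
      · subst hd
        rw [if_pos (by simp)]
        simp only [List.drop_one, List.tail_cons]
        rw [ih rest [] _ hlen, List.splitOnP_cons, if_pos (by simp), List.modifyHead_cons]
        obtain ⟨p, ps, hps⟩ := List.exists_cons_of_ne_nil (List.splitOnP_ne_nil (· == c) rest)
        rw [hps, List.modifyHead_cons]
        simp
      · rw [if_neg (by simpa using hd), ih rest (d :: cur) acc hlen,
          List.splitOnP_cons]
        have hdc : ¬ d = c := fun he => hd he.symm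
        simp only [beq_iff_eq, hdc, if_false]
        obtain ⟨p, ps, hps⟩ := List.exists_cons_of_ne_nil (List.splitOnP_ne_nil (· == c) rest)
        rw [hps, List.modifyHead_cons, List.modifyHead_cons, List.modifyHead_cons]
        simp

lemma chars_splitOn_singleton (c : Char) (l : List Char) :
    PySem.Chars.splitOn l [c] = List.splitOnP (· == c) l := by
  have h := splitOn_go_singleton c (l.length + 1) l [] [] (Nat.le_succ _)
  simpa [PySem.Chars.splitOn, modifyHead_id'] using h

-- A's map function equals tilSeg (the if-branch coincides on [])
lemma mapA_eq_tilSeg (p : List Char) :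
    (if p = [] then p
     else
       let os := PySem.Chars.count p ['O']
       List.replicate (p.length - os) '.' ++ List.replicate os 'O') = tilSeg p := by
  by_cases hp : p = []
  · simp [hp, tilSeg]
  · simp [hp, tilSeg, chars_count_singleton]

-- B's scan, expressed through the split of the rest of the line
lemma tilAltGo_eq : ∀ (cs : List Char) (os dots : Nat) (p : List Char) (ps : List (List Char)),
    List.splitOnP (· == '#') cs = p :: ps →
    tilAltGo cs os dots =
      List.intercalate ['#']
        ((List.replicate (dots + (p.length - p.count 'O')) '.' ++
          List.replicate (os + p.count 'O') 'O') :: ps.map tilSeg) := by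
  intro cs
  induction cs with
  | nil =>
    intro os dots p ps hps
    rw [List.splitOnP_nil] at hps
    cases hps
    simp [tilAltGo, List.intercalate]
  | cons c rest ih =>
    intro os dots p ps hps
    obtain ⟨q, qs, hq⟩ := List.exists_cons_of_ne_nil (List.splitOnP_ne_nil (· == '#') rest)
    rw [List.splitOnP_cons] at hps
    by_cases hc : c = '#'
    · subst hc
      rw [if_pos (by simp)] at hps
      cases hps
      rw [tilAltGo, if_pos rfl, ih 0 0 q qs hq, hq, List.map_cons, intercalate_hash_cons₂]
      simp [tilSeg]
    · rw [if_neg (by simpa using hc), hq, List.modifyHead_cons] at hps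
      injection hps with h1 h2
      subst h1; subst h2
      by_cases hO : c = 'O'
      · subst hO
        rw [tilAltGo, if_neg (by decide), if_pos rfl, ih (os + 1) dots q qs hq]
        have hcount : ('O' :: q).count 'O' = q.count 'O' + 1 := List.count_cons_self
        have h1 : dots + (('O' :: q).length - ('O' :: q).count 'O') =
            dots + (q.length - q.count 'O') := by
          have := List.count_le_length (l := q) (a := 'O')
          rw [hcount, List.length_cons]
          omega
        have h2 : os + ('O' :: q).count 'O' = (os + 1) + q.count 'O' := by
          rw [hcount]; omega
        rw [h1, h2]
      · rw [tilAltGo, if_neg hc, if_neg hO, ih os (dots + 1) q qs hq]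
        have hcount : (c :: q).count 'O' = q.count 'O' := List.count_cons_of_ne hO
        have h1 : dots + ((c :: q).length - (c :: q).count 'O') =
            (dots + 1) + (q.length - q.count 'O') := by
          have := List.count_le_length (l := q) (a := 'O')
          rw [hcount, List.length_cons]
          omega
        have h2 : os + (c :: q).count 'O' = os + q.count 'O' := by rw [hcount]
        rw [h1, h2]

lemma main_lists (cs : List Char) :
    PySem.Chars.join ['#']
      ((PySem.Chars.splitOn cs ['#']).map (fun part =>
        if part = [] then part
        else
          let os := PySem.Chars.count part ['O']
          List.replicate (part.length - os) '.' ++ List.replicate os 'O')) =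
    tilAltGo cs 0 0 := by
  rw [chars_splitOn_singleton]
  obtain ⟨p, ps, hps⟩ := List.exists_cons_of_ne_nil (List.splitOnP_ne_nil (· == '#') cs)
  rw [tilAltGo_eq cs 0 0 p ps hps, hps]
  have hmap : ∀ l : List (List Char),
      l.map (fun part =>
        if part = [] then part
        else
          let os := PySem.Chars.count part ['O']
          List.replicate (part.length - os) '.' ++ List.replicate os 'O') = l.map tilSeg :=
    fun l => List.map_congr_left (fun p _ => mapA_eq_tilSeg p)
  rw [hmap]
  simp [PySem.Chars.join, tilSeg]

-- ===== VERDICT (by name: the statement is the Claim_ definition above) =====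
theorem til_To_north_line_spec : Claim_equal_til_To_north_line := by
  intro line _
  show til_To_north_line line = til_To_north_line_alt line
  unfold til_To_north_line til_To_north_line_alt
  simp only [main_lists]
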